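-- pv_equiv track=rewrite | github.com/AlphaBravoJuliet/Le-Fracteur | projet/tempCodeRunnerFile.py | decrypter_pour_IBAN
-- ===== SOURCE A (Python) =====
-- def fraction_continue(n, d):
--     if d == 0:
--         return []
--     q = n // d
--     r = n - q * d
--     return [q] + fraction_continue(d, r)
--
-- def decrypter_pour_IBAN(fraction):
--     L = fraction_continue(*fraction)
--     message = ""
--     # Conversion des valeurs numériques en caractères selon le standard IBAN
--     for nombre in L:
--         if 1 <= nombre <= 10:
--             message += str(nombre - 1)
--         elif 11 <= nombre <= 36:
--             message += chr(ord("A") + nombre - 11)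
--     return message
-- ===== SOURCE B (Python) =====
-- def decrypter_pour_IBAN(fraction):
--     n, d = fraction
--     message = ""
--     while d != 0:
--         q = n // d
--         r = n - q * d
--         if 1 <= q <= 10:
--             message += str(q - 1)
--         elif 11 <= q <= 36:
--             message += chr(ord("A") + q - 11)
--         n, d = d, r
--     return message
-- ===== Notes on version B (the rewrite author's own statement) =====
-- stated objective: simpler
-- what changed: Replaced the recursive continued-fraction helper plus a second mapping pass over the produced quotient list by a single iterative Euclidean loop that maps each quotient to its IBAN character as it is computed, with no intermediate list.
import Mathlib
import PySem

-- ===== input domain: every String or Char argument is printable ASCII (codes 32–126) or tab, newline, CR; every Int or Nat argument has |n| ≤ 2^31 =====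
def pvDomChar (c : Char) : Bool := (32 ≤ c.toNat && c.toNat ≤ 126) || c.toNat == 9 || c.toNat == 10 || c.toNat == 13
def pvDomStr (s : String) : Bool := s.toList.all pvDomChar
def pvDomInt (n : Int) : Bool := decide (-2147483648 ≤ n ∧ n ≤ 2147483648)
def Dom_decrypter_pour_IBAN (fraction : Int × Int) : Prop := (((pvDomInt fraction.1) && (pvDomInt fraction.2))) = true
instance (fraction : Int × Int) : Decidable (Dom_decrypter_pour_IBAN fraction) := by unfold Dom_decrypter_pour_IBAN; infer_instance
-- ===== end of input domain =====

-- B replaces the recursive quotient-list helper + separate mapping pass by one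
-- iterative Euclidean loop that emits each IBAN character as the quotient is
-- computed (objective: simpler; same behaviour, no intermediate list).


-- the Euclidean step shrinks |d|: n - (n // d) * d is Python's n % d, with |r| < |d|
theorem pvStep_lt (n d : Int) (h : d ≠ 0) :
    (n - PySem.Int.floordiv n d * d).natAbs < d.natAbs := by
  have hid := PySem.Int.floordiv_mul_add_mod n d
  have hr : n - PySem.Int.floordiv n d * d = PySem.Int.mod n d := by omega
  rcases lt_or_gt_of_ne h with hneg | hpos
  · have hb := PySem.Int.mod_neg_bounds (a := n) hneg
    rw [hr]; omega
  · have h1 := PySem.Int.mod_nonneg (a := n) hpos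
    have h2 := PySem.Int.mod_lt (a := n) hpos
    rw [hr]; omega

-- ===== PORT A =====
def fraction_continue (n d : Int) : List Int :=
  if h : d = 0 then []
  else
    let q := PySem.Int.floordiv n d
    let r := n - q * d
    [q] ++ fraction_continue d r
termination_by d.natAbs
decreasing_by exact pvStep_lt n d h

def decrypter_pour_IBAN (fraction : Int × Int) : String :=
  let L := fraction_continue fraction.1 fraction.2
  L.foldl (fun message nombre =>
    if 1 ≤ nombre ∧ nombre ≤ 10 then message ++ PySem.Int.toStr (nombre - 1)
    else if 11 ≤ nombre ∧ nombre ≤ 36 then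
      message ++ String.ofList [Char.ofNat (65 + nombre - 11).toNat]
    else message) ""

-- ===== PORT B =====
def pvIbanLoop (n d : Int) (message : String) : String :=
  if h : d = 0 then message
  else
    let q := PySem.Int.floordiv n d
    let r := n - q * d
    pvIbanLoop d r
      (if 1 ≤ q ∧ q ≤ 10 then message ++ PySem.Int.toStr (q - 1)
       else if 11 ≤ q ∧ q ≤ 36 then message ++ String.ofList [Char.ofNat (65 + q - 11).toNat]
       else message)
termination_by d.natAbs
decreasing_by exact pvStep_lt n d h

def decrypter_pour_IBAN_alt (fraction : Int × Int) : String :=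
  pvIbanLoop fraction.1 fraction.2 ""

-- ===== PRECONDITION & SPEC =====
def Spec_decrypter_pour_IBAN (fraction : Int × Int) (out : String) : Prop := out = decrypter_pour_IBAN_alt fraction
instance (fraction : Int × Int) (out : String) : Decidable (Spec_decrypter_pour_IBAN fraction out) := by unfold Spec_decrypter_pour_IBAN; infer_instance

-- ===== CLAIM (what is proved, stated in full; the proofs are below) =====
def Claim_equal_decrypter_pour_IBAN : Prop := ∀ (fraction : Int × Int), Dom_decrypter_pour_IBAN fraction → Spec_decrypter_pour_IBAN fraction (decrypter_pour_IBAN fraction)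

-- ===== LEMMAS AND PROOFS =====

def pvIbanChar (q : Int) : String :=
  if 1 ≤ q ∧ q ≤ 10 then PySem.Int.toStr (q - 1)
  else if 11 ≤ q ∧ q ≤ 36 then String.ofList [Char.ofNat (65 + q - 11).toNat]
  else ""

theorem pvBody_eq (m : String) (q : Int) :
    (if 1 ≤ q ∧ q ≤ 10 then m ++ PySem.Int.toStr (q - 1)
     else if 11 ≤ q ∧ q ≤ 36 then m ++ String.ofList [Char.ofNat (65 + q - 11).toNat]
     else m) = m ++ pvIbanChar q := by
  unfold pvIbanChar; split_ifs <;> simp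

theorem pvFoldl_shift (L : List Int) :
    ∀ acc : String,
      L.foldl (fun message nombre =>
        if 1 ≤ nombre ∧ nombre ≤ 10 then message ++ PySem.Int.toStr (nombre - 1)
        else if 11 ≤ nombre ∧ nombre ≤ 36 then
          message ++ String.ofList [Char.ofNat (65 + nombre - 11).toNat]
        else message) acc
      = acc ++ L.foldl (fun message nombre =>
        if 1 ≤ nombre ∧ nombre ≤ 10 then message ++ PySem.Int.toStr (nombre - 1)
        else if 11 ≤ nombre ∧ nombre ≤ 36 then
          message ++ String.ofList [Char.ofNat (65 + nombre - 11).toNat]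
        else message) "" := by
  induction L with
  | nil => intro acc; simp
  | cons x L ih =>
      intro acc
      simp only [List.foldl_cons]
      rw [pvBody_eq acc x, pvBody_eq "" x, ih (acc ++ pvIbanChar x), ih ("" ++ pvIbanChar x)]
      simp [String.append_assoc]

theorem pvLoop_eq (n d : Int) : ∀ acc : String,
    pvIbanLoop n d acc
      = acc ++ (fraction_continue n d).foldl (fun message nombre =>
        if 1 ≤ nombre ∧ nombre ≤ 10 then message ++ PySem.Int.toStr (nombre - 1)
        else if 11 ≤ nombre ∧ nombre ≤ 36 then
          message ++ String.ofList [Char.ofNat (65 + nombre - 11).toNat]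
        else message) "" := by
  induction n, d using fraction_continue.induct with
  | case1 n =>
      intro acc
      rw [pvIbanLoop, fraction_continue]
      simp
  | case2 n d h q r ih =>
      intro acc
      rw [pvIbanLoop, fraction_continue]
      simp only [h, dite_false, List.cons_append, List.nil_append, List.foldl_cons]
      rw [ih, pvBody_eq acc, pvBody_eq "", pvFoldl_shift _ ("" ++ pvIbanChar _)]
      simp only [String.append_assoc]
      rfl

-- ===== VERDICT (by name: the statement is the Claim_ definition above) =====
theorem decrypter_pour_IBAN_spec : Claim_equal_decrypter_pour_IBAN := by
  intro fraction _
  unfold Spec_decrypter_pour_IBAN decrypter_pour_IBAN decrypter_pour_IBAN_alt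
  rw [pvLoop_eq]
  simp
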